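-- pv_equiv track=rewrite | github.com/emeleonufavour/python_dsa | leetcode/lt_2597.py | is_beautiful
-- ===== SOURCE A (Python) =====
-- def is_beautiful(nums: list[int], k: int):
--     hash_map = {}
--     for index,value in enumerate(nums):
--         difference1 = value - k
--         difference2 = value + k
--         if (difference1 in hash_map) or (difference2 in hash_map) :
--             return False
--         else:
--             hash_map[value] = index
--     return True
-- ===== SOURCE B (Python) =====
-- def is_beautiful(nums: list[int], k: int):
--     # brute-force pairwise check: compare each element with all later ones
--     t = abs(k)
--     rest = list(nums)
--     while rest:
--         x = rest.pop(0)
--         if any(abs(x - y) == t for y in rest):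
--             return False
--     return True
-- ===== Notes on version B (the rewrite author's own statement) =====
-- stated objective: simpler
-- what changed: Replaces the incremental hash-map of seen values by a direct pairwise sweep: each element is compared against all later elements for absolute difference abs(k), with no auxiliary index structure.
import Mathlib
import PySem

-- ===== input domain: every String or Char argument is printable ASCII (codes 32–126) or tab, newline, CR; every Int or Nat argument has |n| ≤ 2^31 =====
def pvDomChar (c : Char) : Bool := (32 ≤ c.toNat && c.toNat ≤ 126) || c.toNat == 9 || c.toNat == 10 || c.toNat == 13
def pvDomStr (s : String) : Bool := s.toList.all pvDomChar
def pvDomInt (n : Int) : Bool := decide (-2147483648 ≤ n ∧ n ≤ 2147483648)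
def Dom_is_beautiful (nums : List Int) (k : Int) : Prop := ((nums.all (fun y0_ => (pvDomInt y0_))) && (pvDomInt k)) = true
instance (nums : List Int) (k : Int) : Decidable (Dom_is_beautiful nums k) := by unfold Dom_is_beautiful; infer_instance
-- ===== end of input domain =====

-- B replaces A's incremental hash-map of seen values by a plain pairwise sweep
-- (each element against all later ones); same return value, no speed claim.

-- ===== PORT A =====
-- the for-loop over enumerate(nums) with the growing hash_map, early return False
def isbLoopA (k : Int) (d : PySem.Dict Int Int) : List (Int × Int) → Bool
  | [] => true
  | (i, v) :: rest =>
    if d.contains (v - k) || d.contains (v + k) then false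
    else isbLoopA k (d.insert v i) rest

def is_beautiful (nums : List Int) (k : Int) : Bool :=
  isbLoopA k PySem.Dict.empty (PySem.List.enumerate nums)

-- ===== PORT B =====
-- the while-loop popping the front element and scanning the remainder
def isbLoopB (t : Int) : List Int → Bool
  | [] => true
  | x :: rest => if rest.any (fun y => |x - y| == t) then false else isbLoopB t rest

def is_beautiful_alt (nums : List Int) (k : Int) : Bool :=
  isbLoopB |k| nums

-- ===== PRECONDITION & SPEC =====
def Spec_is_beautiful (nums : List Int) (k : Int) (out : Bool) : Prop := out = is_beautiful_alt nums k
instance (nums : List Int) (k : Int) (out : Bool) : Decidable (Spec_is_beautiful nums k out) := by unfold Spec_is_beautiful; infer_instance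

-- ===== CLAIM (what is proved, stated in full; the proofs are below) =====
def Claim_equal_is_beautiful : Prop := ∀ (nums : List Int) (k : Int), Dom_is_beautiful nums k → Spec_is_beautiful nums k (is_beautiful nums k)

-- ===== LEMMAS AND PROOFS =====

-- the symmetric "this pair is fine" relation both programs test
def isbRel (k x y : Int) : Prop := x - y ≠ k ∧ y - x ≠ k

theorem isbAbs_iff (k x y : Int) : (|x - y| = |k|) ↔ ¬ isbRel k x y := by
  unfold isbRel
  simp only [Int.abs_eq_natAbs]
  omega

theorem isbLoopB_iff (k : Int) (l : List Int) :
    isbLoopB |k| l = true ↔ l.Pairwise (isbRel k) := by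
  induction l with
  | nil => exact ⟨fun _ => List.Pairwise.nil, fun _ => rfl⟩
  | cons x rest ih =>
    rw [isbLoopB, List.pairwise_cons]
    by_cases h : ∃ y ∈ rest, |x - y| = |k|
    · have hany : (rest.any fun y => |x - y| == |k|) = true := by
        obtain ⟨y, hy, hxy⟩ := h
        exact List.any_eq_true.2 ⟨y, hy, by simpa using hxy⟩
      rw [hany]
      apply iff_of_false (fun hx => by rw [if_pos rfl] at hx; cases hx)
      rintro ⟨hall, _⟩
      obtain ⟨y, hy, hxy⟩ := h
      exact (isbAbs_iff k x y).1 hxy (hall y hy)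
    · have hany : (rest.any fun y => |x - y| == |k|) = false := by
        refine List.any_eq_false.2 ?_
        intro y hy
        exact fun hbe => h ⟨y, hy, by simpa using hbe⟩
      rw [hany]
      simp only [Bool.false_eq_true, if_false, ih]
      constructor
      · intro hp
        refine ⟨fun y hy => ?_, hp⟩
        by_contra hrel
        exact h ⟨y, hy, (isbAbs_iff k x y).2 hrel⟩
      · rintro ⟨_, hp⟩; exact hp

theorem isbLoopA_iff (k : Int) (l : List Int) :
    ∀ (i : Int) (d : PySem.Dict Int Int),
      (isbLoopA k d (PySem.List.enumerate l i) = true ↔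
        (∀ v ∈ l, ∀ u ∈ d.keys, isbRel k u v) ∧ l.Pairwise (isbRel k)) := by
  induction l with
  | nil => intro i d; simp [PySem.List.enumerate_nil, isbLoopA]
  | cons v rest ih =>
    intro i d
    rw [PySem.List.enumerate_cons, isbLoopA]
    by_cases h : d.contains (v - k) || d.contains (v + k)
    · simp only [h, if_true]
      constructor
      · intro hfalse; cases hfalse
      · rintro ⟨hseen, _⟩
        rcases Bool.or_eq_true_iff.1 h with hc | hc
        · have hmem : (v - k) ∈ d.keys := (PySem.Dict.contains_iff_mem_keys d _).1 hc
          have := hseen v (List.mem_cons_self ..) _ hmem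
          unfold isbRel at this; omega
        · have hmem : (v + k) ∈ d.keys := (PySem.Dict.contains_iff_mem_keys d _).1 hc
          have := hseen v (List.mem_cons_self ..) _ hmem
          unfold isbRel at this; omega
    · simp only [h, if_false, Bool.false_eq_true]
      rw [ih (i + 1) (d.insert v i)]
      have hkeys : ∀ u : Int, u ∈ (d.insert v i).keys ↔ u = v ∨ u ∈ d.keys :=
        fun u => PySem.Dict.mem_keys_insert d v u i
      have hno : ∀ u ∈ d.keys, isbRel k u v := by
        intro u hu
        have h1 : d.contains (v - k) = false ∧ d.contains (v + k) = false := by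
          rcases Bool.or_eq_false_iff.1 (by simpa using h) with ⟨a, b⟩; exact ⟨a, b⟩
        unfold isbRel
        constructor
        · intro huv
          have : u = v + k := by omega
          subst this
          have := (PySem.Dict.contains_iff_mem_keys d _).2 hu
          rw [h1.2] at this; cases this
        · intro huv
          have : u = v - k := by omega
          subst this
          have := (PySem.Dict.contains_iff_mem_keys d _).2 hu
          rw [h1.1] at this; cases this
      constructor
      · rintro ⟨hseen, hp⟩
        refine ⟨?_, ?_⟩
        · intro w hw u hu
          rcases List.mem_cons.1 hw with rfl | hw'
          · exact hno u hu
          · exact hseen w hw' u ((hkeys u).2 (Or.inr hu))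
        · refine List.pairwise_cons.2 ⟨fun w hw => ?_, hp⟩
          exact hseen w hw v ((hkeys v).2 (Or.inl rfl))
      · rintro ⟨hseen, hp⟩
        rcases List.pairwise_cons.1 hp with ⟨hv, hp'⟩
        refine ⟨?_, hp'⟩
        intro w hw u hu
        rcases (hkeys u).1 hu with rfl | hu'
        · exact hv w hw
        · exact hseen w (List.mem_cons_of_mem _ hw) u hu'

-- ===== VERDICT (by name: the statement is the Claim_ definition above) =====
theorem is_beautiful_spec : Claim_equal_is_beautiful := by
  intro nums k _
  unfold Spec_is_beautiful is_beautiful is_beautiful_alt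
  rw [Bool.eq_iff_iff]
  rw [isbLoopA_iff k nums 0 PySem.Dict.empty, isbLoopB_iff k nums]
  simp [PySem.Dict.keys_empty]
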